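-- pv_equiv track=rewrite | github.com/labyrinth-ssr/vis4ODQA | ABCview/qaserver/sentence_span.py | getSentenceSpan
-- ===== SOURCE A (Python) =====
-- def getSentenceSpan(tokens:list)-> list:
--     ret=[]
--     cnt=0
--     for token in tokens :
--         # if
--         ret.append(cnt)
--         if (token=='.' or token=='[SEP]' or token==';' or token=='?'):
--             cnt+=1
--     return ret
-- ===== SOURCE B (Python) =====
-- def getSentenceSpan(tokens: list) -> list:
--     # Run-length construction: find delimiter positions, then emit constant runs
--     # [j]*(segment length) between consecutive delimiter positions.
--     pos = [i for i, t in enumerate(tokens) if t in ('.', '[SEP]', ';', '?')]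
--     out = []
--     prev = -1
--     j = 0
--     for p in pos:
--         out += [j] * (p - prev)
--         j += 1
--         prev = p
--     out += [len(pos)] * (len(tokens) - 1 - prev)
--     return out
-- ===== Notes on version B (the rewrite author's own statement) =====
-- stated objective: alternative
-- what changed: Instead of counting delimiters token by token, B first collects the delimiter positions and then builds the result as constant runs ([j]*(gap between consecutive delimiter positions)), a run-length/segment construction.
import Mathlib
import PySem

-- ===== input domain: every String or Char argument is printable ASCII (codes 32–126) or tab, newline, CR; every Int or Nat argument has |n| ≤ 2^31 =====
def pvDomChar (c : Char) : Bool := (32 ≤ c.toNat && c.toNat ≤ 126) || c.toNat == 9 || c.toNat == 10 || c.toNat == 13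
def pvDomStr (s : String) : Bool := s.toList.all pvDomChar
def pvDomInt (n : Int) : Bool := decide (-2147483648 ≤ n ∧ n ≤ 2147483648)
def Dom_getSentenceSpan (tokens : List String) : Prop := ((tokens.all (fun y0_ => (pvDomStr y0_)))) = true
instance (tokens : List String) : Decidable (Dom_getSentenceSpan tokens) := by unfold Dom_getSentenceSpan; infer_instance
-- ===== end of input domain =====

-- B builds the answer by run-length construction over delimiter positions instead of A's per-token counting loop; same values, no speed claim.

-- ===== PORT A =====
-- loop: state (ret, cnt); append cnt, then bump cnt on a delimiter token
def getSentenceSpan (tokens : List String) : List Int :=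
  (tokens.foldl
    (fun (s : List Int × Int) token =>
      (s.1 ++ [s.2],
       if token = "." ∨ token = "[SEP]" ∨ token = ";" ∨ token = "?" then s.2 + 1 else s.2))
    ([], 0)).1

-- ===== PORT B =====
def pvDelim (t : String) : Bool := t == "." || t == "[SEP]" || t == ";" || t == "?"

def getSentenceSpan_alt (tokens : List String) : List Int :=
  -- pos = [i for i, t in enumerate(tokens) if t in (…)]
  let pos : List Int :=
    (PySem.List.enumerate tokens).filterMap (fun it => if pvDelim it.2 then some it.1 else none)
  -- loop state (out, j, prev); out += [j]*(p-prev)  (Python list-repeat: negative count → empty, as .toNat)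
  let s := pos.foldl
    (fun (s : List Int × Int × Int) p =>
      (s.1 ++ List.replicate (p - s.2.2).toNat s.2.1, s.2.1 + 1, p))
    ([], 0, -1)
  s.1 ++ List.replicate ((tokens.length : Int) - 1 - s.2.2).toNat (pos.length : Int)

-- ===== PRECONDITION & SPEC =====
def Spec_getSentenceSpan (tokens : List String) (out : List Int) : Prop := out = getSentenceSpan_alt tokens
instance (tokens : List String) (out : List Int) : Decidable (Spec_getSentenceSpan tokens out) := by unfold Spec_getSentenceSpan; infer_instance

-- ===== CLAIM (what is proved, stated in full; the proofs are below) =====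
def Claim_equal_getSentenceSpan : Prop := ∀ (tokens : List String), Dom_getSentenceSpan tokens → Spec_getSentenceSpan tokens (getSentenceSpan tokens)

-- ===== LEMMAS AND PROOFS =====

-- reference: exclusive scan of the delimiter flags (A's semantics)
def pvGoF (c : Int) : List Int → List Int
  | [] => []
  | f :: fs => c :: pvGoF (c + f) fs

def pvFlag (t : String) : Int :=
  if t = "." ∨ t = "[SEP]" ∨ t = ";" ∨ t = "?" then 1 else 0

-- reference: B's run-length construction as a recursion over the position list
def pvSeg (j prev n : Int) : List Int → List Int
  | [] => List.replicate (n - 1 - prev).toNat j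
  | p :: ps => List.replicate (p - prev).toNat j ++ pvSeg (j + 1) p n ps

-- delimiter positions of a token list
def pvPos (tokens : List String) : List Int :=
  (PySem.List.enumerate tokens).filterMap (fun it => if pvDelim it.2 then some it.1 else none)

theorem pvA_fold (tokens : List String) : ∀ (r : List Int) (c : Int),
    (tokens.foldl
      (fun (s : List Int × Int) token =>
        (s.1 ++ [s.2],
         if token = "." ∨ token = "[SEP]" ∨ token = ";" ∨ token = "?" then s.2 + 1 else s.2))
      (r, c)).1 = r ++ pvGoF c (tokens.map pvFlag) := by
  induction tokens with
  | nil => intro r c; simp [pvGoF]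
  | cons t ts ih =>
    intro r c
    simp only [List.foldl, List.map, pvGoF, pvFlag]
    rw [ih]
    by_cases h : t = "." ∨ t = "[SEP]" ∨ t = ";" ∨ t = "?" <;> simp [h]

theorem pvB_fold (pos : List Int) : ∀ (acc : List Int) (j prev n : Int),
    (let s := pos.foldl
        (fun (s : List Int × Int × Int) p =>
          (s.1 ++ List.replicate (p - s.2.2).toNat s.2.1, s.2.1 + 1, p))
        (acc, j, prev)
     s.1 ++ List.replicate (n - 1 - s.2.2).toNat (j + (pos.length : Int)))
      = acc ++ pvSeg j prev n pos := by
  induction pos with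
  | nil => intro acc j prev n; simp [pvSeg]
  | cons p ps ih =>
    intro acc j prev n
    simp only [List.foldl, pvSeg]
    have := ih (acc ++ List.replicate (p - prev).toNat j) (j + 1) p n
    simp only at this ⊢
    rw [show (j + (((p :: ps).length : Nat) : Int)) = (j + 1) + ((ps.length : Nat) : Int) by
      simp only [List.length_cons]; push_cast; ring]
    rw [this, List.append_assoc]

-- shifting every position, prev and n by one leaves the runs unchanged
theorem pvSeg_shift (ps : List Int) : ∀ (j prev n : Int),
    pvSeg j prev n (ps.map (· + 1)) = pvSeg j (prev - 1) (n - 1) ps := by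
  induction ps with
  | nil =>
    intro j prev n
    simp only [List.map_nil, pvSeg]
    rw [show n - 1 - 1 - (prev - 1) = n - 1 - prev by ring]
  | cons p ps ih =>
    intro j prev n
    simp only [List.map, pvSeg, ih]
    congr 2
    · omega
    · omega

-- lowering prev by one prepends one copy of j (when prev stays admissible)
theorem pvSeg_prev (ps : List Int) (j prev n : Int)
    (hn : prev ≤ n - 1) (hp : ∀ p ∈ ps, prev ≤ p) :
    pvSeg j (prev - 1) n ps = j :: pvSeg j prev n ps := by
  cases ps with
  | nil =>
    simp only [pvSeg]
    rw [show (n - 1 - (prev - 1)).toNat = (n - 1 - prev).toNat + 1 by omega]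
    simp [List.replicate_succ]
  | cons p ps =>
    have h := hp p (by simp)
    simp only [pvSeg]
    rw [show (p - (prev - 1)).toNat = (p - prev).toNat + 1 by omega]
    simp [List.replicate_succ]

theorem pvPos_cons (t : String) (ts : List String) :
    pvPos (t :: ts) = (if pvDelim t then [(0 : Int)] else []) ++ (pvPos ts).map (· + 1) := by
  unfold pvPos
  rw [PySem.List.enumerate_cons]
  have key : ∀ (s : Int),
      (PySem.List.enumerate ts s).filterMap (fun it => if pvDelim it.2 then some it.1 else none)
        = ((PySem.List.enumerate ts (s - 1)).filterMap
            (fun it => if pvDelim it.2 then some it.1 else none)).map (· + 1) := by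
    induction ts with
    | nil => intro s; simp [PySem.List.enumerate]
    | cons u us ih =>
      intro s
      rw [PySem.List.enumerate_cons, PySem.List.enumerate_cons]
      simp only [List.filterMap_cons]
      by_cases h : pvDelim u
      · simp only [h, if_pos]
        rw [ih (s + 1)]
        simp only [List.map_cons]
        norm_num
      · simp only [h, Bool.false_eq_true, if_neg, not_false_iff]
        rw [ih (s + 1)]
        norm_num
  simp only [List.filterMap_cons]
  by_cases h : pvDelim t
  · simp only [h, if_pos, List.singleton_append]
    rw [key (0 + 1)]
    norm_num
  · simp only [h, Bool.false_eq_true, if_neg, not_false_iff, List.nil_append]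
    rw [key (0 + 1)]
    norm_num

theorem pvPos_nonneg (ts : List String) : ∀ p ∈ pvPos ts, (0 : Int) ≤ p := by
  induction ts with
  | nil => intro p hp; simp [pvPos, PySem.List.enumerate] at hp
  | cons t ts ih =>
    intro p hp
    rw [pvPos_cons] at hp
    rcases List.mem_append.1 hp with h | h
    · by_cases hd : pvDelim t
      · simp [hd] at h; omega
      · simp [hd] at h
    · rcases List.mem_map.1 h with ⟨q, hq, rfl⟩
      have := ih q hq
      omega

theorem pvDelim_iff (t : String) :
    pvDelim t = true ↔ (t = "." ∨ t = "[SEP]" ∨ t = ";" ∨ t = "?") := by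
  simp only [pvDelim, Bool.or_eq_true, beq_iff_eq]
  tauto

theorem pvSeg_eq_goF (ts : List String) : ∀ (c : Int),
    pvSeg c (-1) (ts.length : Int) (pvPos ts) = pvGoF c (ts.map pvFlag) := by
  induction ts with
  | nil => intro c; simp [pvPos, PySem.List.enumerate, pvSeg, pvGoF]
  | cons t ts ih =>
    intro c
    rw [pvPos_cons]
    simp only [List.map, pvGoF, List.length_cons]
    have hn : (((ts.length + 1 : Nat)) : Int) - 1 = (ts.length : Int) := by push_cast; ring
    by_cases h : t = "." ∨ t = "[SEP]" ∨ t = ";" ∨ t = "?"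
    · have hd : pvDelim t = true := (pvDelim_iff t).2 h
      simp only [hd, if_pos, List.singleton_append, pvSeg, pvFlag, h]
      rw [pvSeg_shift, hn]
      rw [show ((0 : Int) - (-1)).toNat = 1 by omega]
      rw [show ((0 : Int) - 1) = -1 by ring]
      rw [ih (c + 1)]
      simp
    · have hd : ¬ pvDelim t = true := fun hc => h ((pvDelim_iff t).1 hc)
      simp only [hd, Bool.false_eq_true, if_neg, not_false_iff, List.nil_append, pvFlag, h]
      rw [pvSeg_shift, hn]
      rw [show (-1 : Int) - 1 = (-1) - 1 from rfl]
      rw [pvSeg_prev (pvPos ts) c (-1) (ts.length : Int) (by omega) ?_]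
      · rw [ih c]
        simp only [add_zero]
      · intro p hp
        have := pvPos_nonneg ts p hp
        omega

-- ===== VERDICT (by name: the statement is the Claim_ definition above) =====
theorem getSentenceSpan_spec : Claim_equal_getSentenceSpan := by
  intro tokens _
  show getSentenceSpan tokens = getSentenceSpan_alt tokens
  unfold getSentenceSpan getSentenceSpan_alt
  rw [pvA_fold tokens [] 0]
  have hB := pvB_fold (pvPos tokens) [] 0 (-1) (tokens.length : Int)
  simp only [pvPos] at hB
  simp only [List.nil_append] at hB ⊢
  rw [show ((0 : Int) + _ = _) from rfl] at hB
  simp only [zero_add] at hB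
  rw [hB]
  rw [show ((PySem.List.enumerate tokens).filterMap
      (fun it => if pvDelim it.2 then some it.1 else none)) = pvPos tokens from rfl]
  rw [pvSeg_eq_goF tokens 0]
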